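-- pv_equiv track=rewrite | github.com/JU571CECL0WN/projects | others/check_user_name.py | method_01
-- ===== SOURCE A (Python) =====
-- def method_01(user_name, users):
--     name_parts = user_name.split('_')
--     while True:
--         name = '_'.join(name_parts)
--         if name in users:
--             return True
--         name_parts.pop()
--         if not name_parts:
--             return False
-- ===== SOURCE B (Python) =====
-- def method_01(user_name, users):
--     # A candidate prefix of user_name is in users iff some user u equals
--     # user_name or is an underscore-terminated proper prefix of it.
--     return any(u == user_name or user_name.startswith(u + '_') for u in users)
-- ===== Notes on version B (the rewrite author's own statement) =====
-- stated objective: alternative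
-- what changed: B scans the users list once, testing each user for equality with user_name or for being an underscore-terminated prefix of it, instead of A's generation of every trimmed prefix of user_name with a membership scan of users per prefix.
import Mathlib
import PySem

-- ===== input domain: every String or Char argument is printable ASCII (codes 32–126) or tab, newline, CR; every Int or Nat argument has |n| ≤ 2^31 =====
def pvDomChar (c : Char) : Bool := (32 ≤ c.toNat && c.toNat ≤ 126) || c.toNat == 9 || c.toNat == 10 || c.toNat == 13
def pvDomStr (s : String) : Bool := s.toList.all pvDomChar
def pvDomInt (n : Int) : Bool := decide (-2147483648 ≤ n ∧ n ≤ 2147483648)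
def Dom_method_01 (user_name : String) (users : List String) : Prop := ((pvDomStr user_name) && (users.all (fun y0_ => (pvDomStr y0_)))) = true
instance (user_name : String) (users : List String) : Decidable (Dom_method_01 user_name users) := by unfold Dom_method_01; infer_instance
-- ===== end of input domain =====

-- B scans the users list once, testing each user for equality with user_name or for being
-- an underscore-terminated prefix of it, instead of A's loop that trims user_name segment
-- by segment and scans users for each trimmed prefix (objective: alternative).

-- ===== PORT A =====
-- while True: name = '_'.join(name_parts); if name in users: return True;
--             name_parts.pop(); if not name_parts: return False
def method01Loop (parts : List String) (users : List String) : Bool :=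
  let name := PySem.Str.join "_" parts
  if users.contains name then true
  else
    let parts' := parts.dropLast
    if parts'.isEmpty then false
    else method01Loop parts' users
termination_by parts.length
decreasing_by
  have hne : parts ≠ [] := by
    rename_i hp
    intro h; subst h; exact hp rfl
  have := List.length_pos_of_ne_nil hne
  simp only [List.length_dropLast]
  omega

def method_01 (user_name : String) (users : List String) : Bool :=
  match PySem.Str.split? user_name "_" with
  | some parts => method01Loop parts users
  | none => false  -- unreachable: the separator "_" is nonempty

-- ===== PORT B =====
-- return any(u == user_name or user_name.startswith(u + '_') for u in users)
def method_01_alt (user_name : String) (users : List String) : Bool :=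
  users.any (fun u => u == user_name || PySem.Str.startswith user_name (u ++ "_"))

-- ===== PRECONDITION & SPEC =====
def Spec_method_01 (user_name : String) (users : List String) (out : Bool) : Prop := out = method_01_alt user_name users
instance (user_name : String) (users : List String) (out : Bool) : Decidable (Spec_method_01 user_name users out) := by unfold Spec_method_01; infer_instance

-- ===== CLAIM (what is proved, stated in full; the proofs are below) =====
def Claim_equal_method_01 : Prop := ∀ (user_name : String) (users : List String), Dom_method_01 user_name users → Spec_method_01 user_name users (method_01 user_name users)

-- ===== LEMMAS AND PROOFS =====

-- the simple split-on-'_' spec function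
def pvParts : List Char → List (List Char)
  | [] => [[]]
  | c :: rest =>
      if c = '_' then [] :: pvParts rest
      else
        match pvParts rest with
        | [] => [[c]]
        | p :: ps => (c :: p) :: ps

def pvMerge (p : List Char) : List (List Char) → List (List Char)
  | [] => [p]
  | q :: qs => (p ++ q) :: qs

theorem pvParts_ne_nil (s : List Char) : pvParts s ≠ [] := by
  cases s with
  | nil => simp [pvParts]
  | cons c rest =>
    simp only [pvParts]
    split
    · simp
    · split <;> simp

theorem pvParts_no_underscore (s : List Char) : ∀ p ∈ pvParts s, '_' ∉ p := by
  induction s with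
  | nil => intro p hp; simp [pvParts] at hp; simp [hp]
  | cons c rest ih =>
    intro p hp
    by_cases hc : c = '_'
    · simp only [pvParts, if_pos hc] at hp
      rcases List.mem_cons.mp hp with h | h
      · simp [h]
      · exact ih p h
    · simp only [pvParts, if_neg hc] at hp
      rcases hq : pvParts rest with _ | ⟨q, qs⟩
      · exact absurd hq (pvParts_ne_nil rest)
      · rw [hq] at hp
        rcases List.mem_cons.mp hp with h | h
        · subst h
          intro hmem
          rcases List.mem_cons.mp hmem with h | h
          · exact hc h.symm
          · exact ih q (hq ▸ List.mem_cons_self) h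
        · exact ih p (hq ▸ List.mem_cons_of_mem q h)

theorem pvJoin_pvParts (s : List Char) : PySem.Chars.join ['_'] (pvParts s) = s := by
  induction s with
  | nil => simp [pvParts, PySem.Chars.join_singleton]
  | cons c rest ih =>
    by_cases hc : c = '_'
    · rcases hq : pvParts rest with _ | ⟨q, qs⟩
      · exact absurd hq (pvParts_ne_nil rest)
      · rw [hq] at ih
        simp only [pvParts, if_pos hc, hq]
        rw [PySem.Chars.join_cons_cons, ih]
        simp [hc]
    · rcases hq : pvParts rest with _ | ⟨q, qs⟩
      · exact absurd hq (pvParts_ne_nil rest)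
      · rw [hq] at ih
        cases qs with
        | nil =>
          simp only [pvParts, if_neg hc, hq]
          rw [PySem.Chars.join_singleton] at ih ⊢
          simp [ih]
        | cons q2 qs2 =>
          simp only [pvParts, if_neg hc, hq, PySem.Chars.join_cons_cons] at ih ⊢
          simp [ih]

theorem pvSplitOnGo_spec (fuel : Nat) : ∀ (l cur : List Char) (acc : List (List Char)),
    l.length < fuel →
    PySem.Chars.splitOn.go ['_'] fuel l cur acc = acc.reverse ++ pvMerge cur.reverse (pvParts l) := by
  induction fuel with
  | zero => intro l cur acc h; omega
  | succ f ih =>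
    intro l cur acc h
    cases l with
    | nil =>
      rw [PySem.Chars.splitOn.go.eq_2 _ _ _ _ (by omega)]
      simp [pvParts, pvMerge]
    | cons c rest =>
      rw [PySem.Chars.splitOn.go.eq_3]
      by_cases hc : c = '_'
      · have hpre : List.isPrefixOf ['_'] (c :: rest) = true := by
          simp [List.isPrefixOf, hc]
        rw [if_pos hpre]
        simp only [List.length_cons] at h
        rw [ih _ _ _ (by simp; omega)]
        rcases hq : pvParts rest with _ | ⟨q, qs⟩
        · exact absurd hq (pvParts_ne_nil rest)
        · simp [pvParts, hc, hq, pvMerge]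
      · have hpre : List.isPrefixOf ['_'] (c :: rest) = false := by
          simp [List.isPrefixOf]
          intro h'; exact hc h'.symm
        rw [if_neg (by simp [hpre])]
        simp only [List.length_cons] at h
        rw [ih _ _ _ (by omega)]
        rcases hq : pvParts rest with _ | ⟨q, qs⟩
        · exact absurd hq (pvParts_ne_nil rest)
        · simp [pvParts, hc, hq, pvMerge, List.append_assoc]

theorem pvSplitOn_spec (s : List Char) : PySem.Chars.splitOn s ['_'] = pvParts s := by
  unfold PySem.Chars.splitOn
  rw [pvSplitOnGo_spec _ _ _ _ (by omega)]
  rcases hq : pvParts s with _ | ⟨q, qs⟩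
  · exact absurd hq (pvParts_ne_nil s)
  · simp [pvMerge]

theorem pvToListInj (a b : String) (h : a.toList = b.toList) : a = b := by
  have := congrArg String.ofList h
  simpa using this

-- A's loop returns true iff some nonempty prefix of the parts list joins to a member of users
theorem pvLoopIff (parts users : List String) (hne : parts ≠ []) :
    method01Loop parts users = true ↔
      ∃ k, 0 < k ∧ k ≤ parts.length ∧ PySem.Str.join "_" (parts.take k) ∈ users := by
  induction parts using List.reverseRecOn with
  | nil => exact absurd rfl hne
  | append_singleton init last ih =>
    rw [method01Loop]
    have hlen : (init ++ [last]).length = init.length + 1 := by simp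
    have htakefull : (init ++ [last]).take (init.length + 1) = init ++ [last] := by
      rw [← hlen, List.take_length]
    by_cases hu : PySem.Str.join "_" (init ++ [last]) ∈ users
    · simp only [List.contains_eq_mem, hu, decide_true, if_true, true_iff]
      exact ⟨init.length + 1, by omega, by omega, by rw [htakefull]; exact hu⟩
    · simp only [List.contains_eq_mem, hu, decide_false, Bool.false_eq_true, if_false,
        List.dropLast_concat]
      by_cases h0 : init = []
      · subst h0
        simp only [List.isEmpty_nil, if_true, Bool.false_eq_true, false_iff]
        rintro ⟨k, hk0, hk1, hkmem⟩
        simp only [List.nil_append, List.length_cons, List.length_nil] at hk1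
        have : k = 1 := by omega
        subst this
        simp only [List.nil_append, List.take_succ_cons, List.take_nil] at hkmem
        exact hu hkmem
      · rw [if_neg (by simpa using h0)]
        rw [ih h0]
        constructor
        · rintro ⟨k, hk0, hk1, hkmem⟩
          refine ⟨k, hk0, by simp; omega, ?_⟩
          rwa [List.take_append_of_le_length hk1]
        · rintro ⟨k, hk0, hk1, hkmem⟩
          rw [hlen] at hk1
          by_cases hke : k = init.length + 1
          · subst hke
            rw [htakefull] at hkmem
            exact absurd hkmem hu
          · have hkle : k ≤ init.length := by omega
            refine ⟨k, hk0, hkle, ?_⟩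
            rwa [List.take_append_of_le_length hkle] at hkmem

-- joins of nonempty prefixes of the parts are exactly the whole string and its
-- underscore-terminated prefixes
theorem pvCandIff (ps : List (List Char)) (hne : ps ≠ []) (hnu : ∀ p ∈ ps, '_' ∉ p)
    (t : List Char) :
    (∃ k, 0 < k ∧ k ≤ ps.length ∧ t = PySem.Chars.join ['_'] (ps.take k)) ↔
      (t = PySem.Chars.join ['_'] ps ∨ t ++ ['_'] <+: PySem.Chars.join ['_'] ps) := by
  induction ps generalizing t with
  | nil => exact absurd rfl hne
  | cons p ps' ih =>
    cases ps' with
    | nil =>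
      rw [PySem.Chars.join_singleton]
      constructor
      · rintro ⟨k, hk0, hk1, hkt⟩
        simp only [List.length_cons, List.length_nil] at hk1
        have : k = 1 := by omega
        subst this
        simp only [List.take_succ_cons, List.take_nil, PySem.Chars.join_singleton] at hkt
        exact Or.inl hkt
      · rintro (h | h)
        · exact ⟨1, by omega, by simp, by simp [PySem.Chars.join_singleton, h]⟩
        · exfalso
          have : '_' ∈ p := h.subset (by simp)
          exact hnu p (by simp) this
    | cons q qs =>
      have hj : PySem.Chars.join ['_'] (p :: q :: qs) = p ++ '_' :: PySem.Chars.join ['_'] (q :: qs) := by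
        rw [PySem.Chars.join_cons_cons]; simp
      have hih := ih (by simp) (fun r hr => hnu r (List.mem_cons_of_mem p hr))
      rw [hj]
      constructor
      · rintro ⟨k, hk0, hk1, hkt⟩
        cases k with
        | zero => omega
        | succ k' =>
          cases k' with
          | zero =>
            -- t = p
            simp only [List.take_succ_cons, List.take_zero, PySem.Chars.join_singleton] at hkt
            subst hkt
            right
            exact ⟨PySem.Chars.join ['_'] (q :: qs), by simp⟩
          | succ k'' =>
            have hkle : k'' + 1 ≤ (q :: qs).length := by
              simp only [List.length_cons] at hk1 ⊢; omega
            have htake : (p :: q :: qs).take (k'' + 1 + 1) = p :: ((q :: qs).take (k'' + 1)) := by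
              simp [List.take_succ_cons]
            rw [htake] at hkt
            have hqs : (q :: qs).take (k'' + 1) = q :: qs.take k'' := by
              simp [List.take_succ_cons]
            have hjt : PySem.Chars.join ['_'] (p :: (q :: qs).take (k'' + 1))
                = p ++ '_' :: PySem.Chars.join ['_'] ((q :: qs).take (k'' + 1)) := by
              rw [hqs, PySem.Chars.join_cons_cons]; simp
            rw [hjt] at hkt
            rcases (hih _).mp ⟨k'' + 1, by omega, hkle, rfl⟩ with h | h
            · left; rw [hkt, h]
            · right
              rw [hkt]
              have e1 : (p ++ '_' :: PySem.Chars.join ['_'] ((q :: qs).take (k'' + 1))) ++ ['_']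
                  = (p ++ ['_']) ++ (PySem.Chars.join ['_'] ((q :: qs).take (k'' + 1)) ++ ['_']) := by
                simp
              have e2 : p ++ '_' :: PySem.Chars.join ['_'] (q :: qs)
                  = (p ++ ['_']) ++ PySem.Chars.join ['_'] (q :: qs) := by simp
              rw [e1, e2]
              exact (List.prefix_append_right_inj (p ++ ['_'])).mpr h
      · rintro (h | h)
        · -- t is the whole join: k = length
          refine ⟨(p :: q :: qs).length, by simp, le_refl _, ?_⟩
          rw [List.take_length, hj, h]
        · -- t ++ '_' is a prefix of p ++ '_' :: join (q::qs)
          rcases h with ⟨r, hr⟩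
          by_cases hlt : t.length < p.length
          · exfalso
            have hpre1 : t ++ ['_'] <+: p ++ '_' :: PySem.Chars.join ['_'] (q :: qs) := ⟨r, hr⟩
            have hpre2 : p <+: p ++ '_' :: PySem.Chars.join ['_'] (q :: qs) := ⟨_, rfl⟩
            have : t ++ ['_'] <+: p :=
              List.prefix_of_prefix_length_le hpre1 hpre2 (by simp; omega)
            exact hnu p (by simp) (this.subset (by simp))
          · have hple : p.length ≤ t.length := by omega
            have hpt : p <+: t := by
              have hpre1 : t <+: p ++ '_' :: PySem.Chars.join ['_'] (q :: qs) :=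
                (List.prefix_append t ['_']).trans ⟨r, hr⟩
              have hpre2 : p <+: p ++ '_' :: PySem.Chars.join ['_'] (q :: qs) := ⟨_, rfl⟩
              exact List.prefix_of_prefix_length_le hpre2 hpre1 hple
            rcases hpt with ⟨t2, ht2⟩
            subst ht2
            have hcancel : t2 ++ ['_'] <+: '_' :: PySem.Chars.join ['_'] (q :: qs) := by
              have : (p ++ t2) ++ ['_'] = p ++ (t2 ++ ['_']) := by simp
              rw [this] at hr
              exact (List.prefix_append_right_inj p).mp ⟨r, hr⟩
            cases t2 with
            | nil =>
              -- t = p : take 1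
              exact ⟨1, by omega, by simp, by simp [PySem.Chars.join_singleton]⟩
            | cons c t2' =>
              have hc : c = '_' ∧ t2' ++ ['_'] <+: PySem.Chars.join ['_'] (q :: qs) := by
                have := hcancel
                rw [List.cons_append] at this
                rw [List.cons_prefix_cons] at this
                exact this
              rcases hc with ⟨rfl, hpre⟩
              rcases (hih t2').mpr (by
                by_cases he : t2' = PySem.Chars.join ['_'] (q :: qs)
                · exact Or.inl he
                · exact Or.inr hpre) with ⟨k, hk0, hk1, hkt⟩
              refine ⟨k + 1, by omega, by simp only [List.length_cons] at hk1 ⊢; omega, ?_⟩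
              have hqs : (p :: q :: qs).take (k + 1) = p :: (q :: qs).take k := by
                simp [List.take_succ_cons]
              rw [hqs]
              have hktake : (q :: qs).take k ≠ [] := by
                apply List.ne_nil_of_length_pos
                simp only [List.length_take, List.length_cons]
                omega
              rcases htk : (q :: qs).take k with _ | ⟨w, ws⟩
              · exact absurd htk hktake
              · rw [PySem.Chars.join_cons_cons]
                rw [htk] at hkt
                rw [← hkt]
                simp

-- B returns true iff some user equals user_name or is an underscore-terminated prefix of it
theorem pvAltIff (u : String) (users : List String) :
    method_01_alt u users = true ↔
      ∃ x ∈ users, x = u ∨ x.toList ++ ['_'] <+: u.toList := by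
  unfold method_01_alt
  rw [List.any_eq_true]
  constructor
  · rintro ⟨x, hx, hp⟩
    refine ⟨x, hx, ?_⟩
    rcases Bool.or_eq_true_iff.mp hp with h | h
    · exact Or.inl (beq_iff_eq.mp h)
    · right
      rw [PySem.Str.startswith_eq] at h
      rw [PySem.Chars.startswith_iff] at h
      simpa using h
  · rintro ⟨x, hx, h⟩
    refine ⟨x, hx, ?_⟩
    rcases h with h | h
    · exact Bool.or_eq_true_iff.mpr (Or.inl (beq_iff_eq.mpr h))
    · refine Bool.or_eq_true_iff.mpr (Or.inr ?_)
      rw [PySem.Str.startswith_eq, PySem.Chars.startswith_iff]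
      simpa using h

-- ===== VERDICT (by name: the statement is the Claim_ definition above) =====
theorem method_01_spec : Claim_equal_method_01 := by
  intro u users _
  unfold Spec_method_01 method_01
  have h1 : "_".toList = ['_'] := by decide
  have hsplit : PySem.Str.split? u "_" = some ((pvParts u.toList).map String.ofList) := by
    simp [PySem.Str.split?, PySem.Chars.split?, h1, pvSplitOn_spec]
  rw [hsplit]
  have hne : (pvParts u.toList).map String.ofList ≠ [] := by
    simp; exact pvParts_ne_nil _
  rw [Bool.eq_iff_iff, pvLoopIff _ _ hne, pvAltIff]
  have hjoin : ∀ k, (PySem.Str.join "_" (((pvParts u.toList).map String.ofList).take k)).toList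
      = PySem.Chars.join ['_'] ((pvParts u.toList).take k) := by
    intro k
    rw [PySem.Str.toList_join, h1, ← List.map_take, List.map_map]
    simp [Function.comp_def]
  have hlen : ((pvParts u.toList).map String.ofList).length = (pvParts u.toList).length := by
    simp
  constructor
  · rintro ⟨k, hk0, hk1, hkmem⟩
    refine ⟨_, hkmem, ?_⟩
    have : (PySem.Str.join "_" (((pvParts u.toList).map String.ofList).take k)).toList
        = PySem.Chars.join ['_'] ((pvParts u.toList).take k) := hjoin k
    rcases (pvCandIff (pvParts u.toList) (pvParts_ne_nil _) (pvParts_no_underscore _) _).mp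
        ⟨k, hk0, by rwa [hlen] at hk1, this⟩ with h | h
    · left
      apply pvToListInj
      rw [h, pvJoin_pvParts]
    · right
      rwa [pvJoin_pvParts] at h
  · rintro ⟨x, hx, h⟩
    have h' : x.toList = PySem.Chars.join ['_'] (pvParts u.toList) ∨
        x.toList ++ ['_'] <+: PySem.Chars.join ['_'] (pvParts u.toList) := by
      rw [pvJoin_pvParts]
      rcases h with h | h
      · exact Or.inl (by rw [h])
      · exact Or.inr h
    rcases (pvCandIff (pvParts u.toList) (pvParts_ne_nil _) (pvParts_no_underscore _) _).mpr h'
      with ⟨k, hk0, hk1, hkt⟩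
    refine ⟨k, hk0, by rwa [hlen], ?_⟩
    have : PySem.Str.join "_" (((pvParts u.toList).map String.ofList).take k) = x := by
      apply pvToListInj
      rw [hjoin k, ← hkt]
    rwa [this]
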